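-- pv_equiv track=rewrite | github.com/jeffrysurya/evonic | backend/tools/patch.py | _find_hunk_pos
-- ===== SOURCE A (Python) =====
-- SEARCH_WINDOW = 50
--
-- def _find_hunk_pos(lines: list, hunk_lines: list, stated_pos: int,
--                    fuzzy: bool = True) -> tuple:
--     """
--     Find the 0-based position in `lines` where the hunk should be applied.
--
--     For insertion-only hunks (no context or removal lines) the stated position
--     is trusted directly — no search is needed.
--
--     For hunks with context/removal lines, searches outward from `stated_pos`
--     within ±SEARCH_WINDOW lines, comparing after stripping trailing whitespace.
--
--     `lines` may contain line endings or bare strings — both are handled.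
--
--     Returns (pos, None) on success, (-1, None) if no match found.
--     """
--     to_match = [(op, txt) for op, txt, _ in hunk_lines if op in (' ', '-')]
--
--     # Insertion-only: no context to verify, trust the stated line number.
--     if not to_match:
--         pos = max(0, min(stated_pos, len(lines)))
--         return (pos, None)
--
--     window = SEARCH_WINDOW if fuzzy else 0
--
--     for delta in range(window + 1):
--         for sign in ([0] if delta == 0 else [1, -1]):
--             pos = stated_pos + sign * delta
--             if pos < 0 or pos + len(to_match) > len(lines):
--                 continue
--             if all(
--                 lines[pos + i].rstrip('\r\n').rstrip() == to_match[i][1].rstrip()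
--                 for i in range(len(to_match))
--             ):
--                 return (pos, None)
--
--     return (-1, None)
-- ===== SOURCE B (Python) =====
-- SEARCH_WINDOW = 50
--
-- def _find_hunk_pos(lines: list, hunk_lines: list, stated_pos: int,
--                    fuzzy: bool = True) -> tuple:
--     """Gather-all-then-select-best re-implementation of _find_hunk_pos."""
--     to_match = [(op, txt) for op, txt, _ in hunk_lines if op in (' ', '-')]
--
--     # Insertion-only: no context to verify, trust the stated line number.
--     if not to_match:
--         pos = max(0, min(stated_pos, len(lines)))
--         return (pos, None)
--
--     window = SEARCH_WINDOW if fuzzy else 0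
--     need = [txt.rstrip() for _, txt in to_match]
--     k = len(need)
--     n = len(lines)
--
--     candidates = [
--         pos
--         for pos in range(stated_pos - window, stated_pos + window + 1)
--         if 0 <= pos and pos + k <= n
--         and all(lines[pos + i].rstrip('\r\n').rstrip() == need[i]
--                 for i in range(k))
--     ]
--
--     if not candidates:
--         return (-1, None)
--     best = min(candidates,
--                key=lambda p: (abs(p - stated_pos), 0 if p >= stated_pos else 1))
--     return (best, None)
-- ===== Notes on version B (the rewrite author's own statement) =====
-- stated objective: alternative
-- what changed: The ordered early-exit outward scan (delta 0..window, sign +/-) is replaced by collecting every matching position in the whole window and then selecting the best one by the key (abs(pos-stated_pos), 0 if pos>=stated_pos else 1) with min().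
import Mathlib
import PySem

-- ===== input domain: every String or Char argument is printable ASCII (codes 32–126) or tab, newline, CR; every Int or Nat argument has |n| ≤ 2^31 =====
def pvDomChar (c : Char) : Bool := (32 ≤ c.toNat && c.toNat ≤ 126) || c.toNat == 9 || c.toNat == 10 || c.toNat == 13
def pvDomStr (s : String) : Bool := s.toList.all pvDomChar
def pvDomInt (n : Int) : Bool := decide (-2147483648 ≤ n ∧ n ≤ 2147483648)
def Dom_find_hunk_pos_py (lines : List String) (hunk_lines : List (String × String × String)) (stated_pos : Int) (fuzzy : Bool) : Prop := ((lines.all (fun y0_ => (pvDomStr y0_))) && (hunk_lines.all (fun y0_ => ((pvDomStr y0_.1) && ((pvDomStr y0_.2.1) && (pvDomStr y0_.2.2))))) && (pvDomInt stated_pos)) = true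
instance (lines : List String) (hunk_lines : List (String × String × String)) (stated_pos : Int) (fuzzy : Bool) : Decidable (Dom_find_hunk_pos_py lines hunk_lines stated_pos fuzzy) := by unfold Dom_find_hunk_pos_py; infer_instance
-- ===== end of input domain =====

-- B replaces A's ordered early-exit outward scan with gather-all-matches-then-pick-best-by-key
-- (same result, same asymptotic cost: objective "alternative"). Both Pythons are total.

-- hand port of Python's s.rstrip('\r\n') (drop trailing '\r'/'\n' code points; exact on all inputs)
def pvRstripCRLF (s : String) : String :=
  String.mk (((s.toList.reverse).dropWhile (fun c => c == '\r' || c == '\n')).reverse)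

-- shared normalisation: both Pythons contain the identical expression  x.rstrip('\r\n').rstrip()
def pvNorm (s : String) : String := PySem.Str.rstrip (pvRstripCRLF s)

-- shared to_match comprehension: identical line of code in A and B
def pvToMatch (hunk_lines : List (String × String × String)) : List (String × String) :=
  (hunk_lines.filter (fun h => h.1 == " " || h.1 == "-")).map (fun h => (h.1, h.2.1))

-- ===== PORT A =====
-- the `all(...)` generator of A
def pvCheckA (lines : List String) (toMatch : List (String × String)) (pos : Int) : Bool :=
  (List.range toMatch.length).all (fun i =>
    pvNorm (PySem.List.pyGetD lines (pos + (i : Int)) "") ==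
      PySem.Str.rstrip (PySem.List.pyGetD toMatch (i : Int) ("", "")).2)

-- inner `for sign in …` loop with its continue / early return
def pvScanSigns (lines : List String) (toMatch : List (String × String)) (stated delta : Int) :
    List Int → Option Int
  | [] => none
  | sg :: rest =>
      let pos := stated + sg * delta
      if pos < 0 ∨ pos + (toMatch.length : Int) > (lines.length : Int) then
        pvScanSigns lines toMatch stated delta rest
      else if pvCheckA lines toMatch pos then some pos
      else pvScanSigns lines toMatch stated delta rest

-- outer `for delta in range(window + 1)` loop
def pvScanDeltas (lines : List String) (toMatch : List (String × String)) (stated : Int) :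
    List Int → Option Int
  | [] => none
  | d :: rest =>
      match pvScanSigns lines toMatch stated d (if d == 0 then [0] else [1, -1]) with
      | some p => some p
      | none => pvScanDeltas lines toMatch stated rest

def find_hunk_pos_py (lines : List String) (hunk_lines : List (String × String × String)) (stated_pos : Int) (fuzzy : Bool) : Int × Option String :=
  let toMatch := pvToMatch hunk_lines
  if toMatch.isEmpty then (max 0 (min stated_pos (lines.length : Int)), none)
  else
    let window : Int := if fuzzy then 50 else 0
    match pvScanDeltas lines toMatch stated_pos (PySem.List.pyRange 0 (window + 1) 1) with
    | some p => (p, none)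
    | none => (-1, none)

-- ===== PORT B =====
-- the candidate filter of B's list comprehension
def pvCheckB (lines : List String) (need : List String) (pos : Int) : Bool :=
  decide (0 ≤ pos) && decide (pos + (need.length : Int) ≤ (lines.length : Int)) &&
  (List.range need.length).all (fun i =>
    pvNorm (PySem.List.pyGetD lines (pos + (i : Int)) "") == PySem.List.pyGetD need (i : Int) "")

def find_hunk_pos_py_alt (lines : List String) (hunk_lines : List (String × String × String)) (stated_pos : Int) (fuzzy : Bool) : Int × Option String :=
  let toMatch := pvToMatch hunk_lines
  if toMatch.isEmpty then (max 0 (min stated_pos (lines.length : Int)), none)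
  else
    let window : Int := if fuzzy then 50 else 0
    let need := toMatch.map (fun h => PySem.Str.rstrip h.2)
    let cands := (PySem.List.pyRange (stated_pos - window) (stated_pos + window + 1) 1).filter
        (pvCheckB lines need)
    match PySem.List.min2? cands (fun p => |p - stated_pos|)
        (fun p => if stated_pos ≤ p then (0 : Int) else 1) with
    | some p => (p, none)
    | none => (-1, none)

-- ===== PRECONDITION & SPEC =====
def Spec_find_hunk_pos_py (lines : List String) (hunk_lines : List (String × String × String)) (stated_pos : Int) (fuzzy : Bool) (out : Int × Option String) : Prop := out = find_hunk_pos_py_alt lines hunk_lines stated_pos fuzzy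
instance (lines : List String) (hunk_lines : List (String × String × String)) (stated_pos : Int) (fuzzy : Bool) (out : Int × Option String) : Decidable (Spec_find_hunk_pos_py lines hunk_lines stated_pos fuzzy out) := by unfold Spec_find_hunk_pos_py; infer_instance

-- ===== CLAIM (what is proved, stated in full; the proofs are below) =====
def Claim_equal_find_hunk_pos_py : Prop := ∀ (lines : List String) (hunk_lines : List (String × String × String)) (stated_pos : Int) (fuzzy : Bool), Dom_find_hunk_pos_py lines hunk_lines stated_pos fuzzy → Spec_find_hunk_pos_py lines hunk_lines stated_pos fuzzy (find_hunk_pos_py lines hunk_lines stated_pos fuzzy)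

-- ===== LEMMAS AND PROOFS =====

-- Bool "strictly better key" test, exactly the comparison min2? performs with B's two keys
def pvKb (s x m : Int) : Bool :=
  decide (|x - s| < |m - s|) ||
    (!decide (|m - s| < |x - s|) &&
      decide ((if s ≤ x then (0 : Int) else 1) < (if s ≤ m then (0 : Int) else 1)))

theorem pvKb_true_iff (s x m : Int) : pvKb s x m = true ↔
    ((x - s).natAbs < (m - s).natAbs ∨
      ((x - s).natAbs ≤ (m - s).natAbs ∧ s ≤ x ∧ m < s)) := by
  simp only [pvKb, Int.abs_eq_natAbs, Bool.or_eq_true, Bool.and_eq_true, Bool.not_eq_eq_eq_not,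
    Bool.not_true, decide_eq_true_eq, decide_eq_false_iff_not]
  split_ifs <;> omega

theorem pvKb_false_iff (s x m : Int) : pvKb s x m = false ↔
    ¬ ((x - s).natAbs < (m - s).natAbs ∨
      ((x - s).natAbs ≤ (m - s).natAbs ∧ s ≤ x ∧ m < s)) := by
  rw [← pvKb_true_iff]
  cases h : pvKb s x m <;> simp [h]

theorem pvKb_irrefl (s x : Int) : pvKb s x x = false := by
  rw [pvKb_false_iff]; omega

theorem pvKb_total (s p q : Int) (h : p ≠ q) : pvKb s p q = true ∨ pvKb s q p = true := by
  rw [pvKb_true_iff, pvKb_true_iff]; omega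

theorem pvKb_neg_trans (s x m r : Int) (h1 : pvKb s x m = false) (h2 : pvKb s m r = false) :
    pvKb s x r = false := by
  rw [pvKb_false_iff] at *; omega

-- min2? with B's keys is a foldl of the pvKb step
theorem pvMin2_eq_foldl (xs : List Int) (s : Int) :
    PySem.List.min2? xs (fun p => |p - s|) (fun p => if s ≤ p then (0 : Int) else 1)
      = xs.foldl (fun acc x => match acc with
          | none => some x
          | some m => if pvKb s x m then some x else some m) none := by
  unfold PySem.List.min2?
  congr 1
  funext acc x
  cases acc with
  | none => rfl
  | some m => simp only [pvKb]; exact if_congr Iff.rfl rfl rfl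

theorem pvFoldMin_spec (s : Int) : ∀ (xs : List Int) (m : Int),
    ∃ r, xs.foldl (fun acc x => match acc with
          | none => some x
          | some m => if pvKb s x m then some x else some m) (some m) = some r ∧
      (r = m ∨ r ∈ xs) ∧ pvKb s m r = false ∧ ∀ y ∈ xs, pvKb s y r = false := by
  intro xs
  induction xs with
  | nil => intro m; exact ⟨m, rfl, Or.inl rfl, pvKb_irrefl s m, by simp⟩
  | cons x t ih =>
      intro m
      by_cases hx : pvKb s x m = true
      · obtain ⟨r, hr, hmem, hxr, hall⟩ := ih x
        refine ⟨r, by simpa [hx] using hr, ?_, ?_, ?_⟩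
        · rcases hmem with h | h
          · exact Or.inr (by simp [h])
          · exact Or.inr (List.mem_cons_of_mem _ h)
        · rw [pvKb_false_iff] at hxr ⊢
          rw [pvKb_true_iff] at hx
          omega
        · intro y hy
          rcases List.mem_cons.mp hy with h | h
          · subst h; exact hxr
          · exact hall y h
      · have hx' : pvKb s x m = false := by
          cases h : pvKb s x m with
          | false => rfl
          | true => exact absurd h hx
        obtain ⟨r, hr, hmem, hmr, hall⟩ := ih m
        refine ⟨r, by simpa [hx'] using hr, ?_, hmr, ?_⟩
        · rcases hmem with h | h
          · exact Or.inl h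
          · exact Or.inr (List.mem_cons_of_mem _ h)
        · intro y hy
          rcases List.mem_cons.mp hy with h | h
          · subst h; exact pvKb_neg_trans s y m r hx' hmr
          · exact hall y h

theorem pvAllCongr {α : Type} {l : List α} {p q : α → Bool} (h : ∀ x ∈ l, p x = q x) :
    l.all p = l.all q := by
  induction l with
  | nil => rfl
  | cons x t ih =>
      simp only [List.all_cons]
      rw [h x (List.mem_cons_self), ih (fun y hy => h y (List.mem_cons_of_mem _ hy))]

-- the candidate test of B equals A's bounds guard plus A's all(...) check
theorem pvCheckB_eq (lines : List String) (toMatch : List (String × String)) (pos : Int) :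
    pvCheckB lines (toMatch.map (fun h => PySem.Str.rstrip h.2)) pos
      = (decide (0 ≤ pos) && decide (pos + (toMatch.length : Int) ≤ (lines.length : Int))
          && pvCheckA lines toMatch pos) := by
  unfold pvCheckB pvCheckA
  simp only [List.length_map]
  have hall : (List.range toMatch.length).all (fun i =>
      pvNorm (PySem.List.pyGetD lines (pos + (i : Int)) "") ==
        PySem.List.pyGetD (toMatch.map (fun h => PySem.Str.rstrip h.2)) (i : Int) "")
    = (List.range toMatch.length).all (fun i =>
      pvNorm (PySem.List.pyGetD lines (pos + (i : Int)) "") ==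
        PySem.Str.rstrip (PySem.List.pyGetD toMatch (i : Int) ("", "")).2) := by
    refine pvAllCongr (fun i hi => ?_)
    have hi' : i < toMatch.length := List.mem_range.mp hi
    have h0 : (0 : Int) ≤ (i : Int) := by exact_mod_cast Nat.zero_le i
    have h1 : (i : Int) < ((toMatch.map (fun h => PySem.Str.rstrip h.2)).length : Int) := by
      simp only [List.length_map]; exact_mod_cast hi'
    have h2 : (i : Int) < (toMatch.length : Int) := by exact_mod_cast hi'
    rw [PySem.List.pyGetD_eq_getElem _ _ h0 h1, PySem.List.pyGetD_eq_getElem _ _ h0 h2]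
    rw [List.getElem_map]
  rw [hall]

-- one step of the sign loop, phrased through B's candidate test
theorem pvScanSigns_cons (lines : List String) (toMatch : List (String × String))
    (s d sg : Int) (rest : List Int) :
    pvScanSigns lines toMatch s d (sg :: rest)
      = (if pvCheckB lines (toMatch.map (fun h => PySem.Str.rstrip h.2)) (s + sg * d)
          then some (s + sg * d) else pvScanSigns lines toMatch s d rest) := by
  rw [pvCheckB_eq]
  show (if s + sg * d < 0 ∨ s + sg * d + (toMatch.length : Int) > (lines.length : Int) then
      pvScanSigns lines toMatch s d rest
    else if pvCheckA lines toMatch (s + sg * d) then some (s + sg * d)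
    else pvScanSigns lines toMatch s d rest) = _
  by_cases hg : s + sg * d < 0 ∨ s + sg * d + (toMatch.length : Int) > (lines.length : Int)
  · have hb : (decide (0 ≤ s + sg * d) &&
        decide (s + sg * d + (toMatch.length : Int) ≤ (lines.length : Int))) = false := by
      rcases hg with h | h
      · have : decide (0 ≤ s + sg * d) = false := by simp; omega
        simp [this]
      · have : decide (s + sg * d + (toMatch.length : Int) ≤ (lines.length : Int)) = false := by
          simp; omega
        simp [this]
    rw [if_pos hg, hb, Bool.false_and]
    simp
  · push_neg at hg
    have h0 : decide (0 ≤ s + sg * d) = true := by simp; omega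
    have h1 : decide (s + sg * d + (toMatch.length : Int) ≤ (lines.length : Int)) = true := by
      simp; omega
    rw [if_neg (by push_neg; exact hg), h0, h1]
    simp

-- the outward scan, started at delta = d, returns the matching position nearest to s
-- (ties broken towards s + delta) among deltas in [d, w], or none if there is no such match
theorem pvScanDeltas_spec (lines : List String) (toMatch : List (String × String))
    (s w : Int) (hw : 0 ≤ w) :
    ∀ (n : Nat) (d : Int), 0 ≤ d → (w + 1 - d).toNat = n →
    (match pvScanDeltas lines toMatch s (PySem.List.pyRange d (w + 1) 1) with
     | some p => pvCheckB lines (toMatch.map (fun h => PySem.Str.rstrip h.2)) p = true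
         ∧ d ≤ ((p - s).natAbs : Int) ∧ ((p - s).natAbs : Int) ≤ w
         ∧ ∀ q, pvCheckB lines (toMatch.map (fun h => PySem.Str.rstrip h.2)) q = true →
             d ≤ ((q - s).natAbs : Int) → ((q - s).natAbs : Int) ≤ w → pvKb s q p = false
     | none => ∀ q, pvCheckB lines (toMatch.map (fun h => PySem.Str.rstrip h.2)) q = true →
         d ≤ ((q - s).natAbs : Int) → ¬ ((q - s).natAbs : Int) ≤ w) := by
  intro n
  induction n with
  | zero =>
      intro d hd hn
      rw [PySem.List.pyRange_one_eq_nil (by omega)]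
      simp only [pvScanDeltas]
      intro q _ hq1 hq2
      omega
  | succ n ih =>
      intro d hd hn
      rw [PySem.List.pyRange_one_cons (by omega : d < w + 1)]
      simp only [pvScanDeltas]
      by_cases hd0 : d = 0
      · subst hd0
        have hb : ((0 : Int) == 0) = true := by simp
        rw [hb]
        simp only [if_true]
        rw [pvScanSigns_cons]
        have e : s + 0 * 0 = s := by ring
        rw [e]
        by_cases hPs : pvCheckB lines (toMatch.map (fun h => PySem.Str.rstrip h.2)) s = true
        · rw [if_pos hPs]
          refine ⟨hPs, by simp, by simp; omega, ?_⟩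
          intro q hq h1 h2
          rw [pvKb_false_iff]
          omega
        · rw [if_neg hPs]
          simp only [pvScanSigns]
          have e1 : (0 : Int) + 1 = 1 := by ring
          rw [e1]
          have ihh := ih 1 (by omega) (by omega)
          cases hres : pvScanDeltas lines toMatch s (PySem.List.pyRange 1 (w + 1) 1) with
          | some p =>
              rw [hres] at ihh
              obtain ⟨hp, hp1, hp2, hmin⟩ := ihh
              refine ⟨hp, by omega, hp2, ?_⟩
              intro q hq h1 h2
              by_cases hq0 : (q - s).natAbs = 0
              · have : q = s := by omega
                rw [this] at hq
                exact absurd hq hPs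
              · exact hmin q hq (by omega) h2
          | none =>
              rw [hres] at ihh
              intro q hq h1
              by_cases hq0 : (q - s).natAbs = 0
              · have : q = s := by omega
                rw [this] at hq
                exact absurd hq hPs
              · exact ihh q hq (by omega)
      · have hb : (d == 0) = false := by simp [hd0]
        rw [hb]
        simp only [Bool.false_eq_true, if_false]
        rw [pvScanSigns_cons, pvScanSigns_cons]
        have e1 : s + 1 * d = s + d := by ring
        have e2 : s + (-1) * d = s - d := by ring
        rw [e1, e2]
        by_cases hPa : pvCheckB lines (toMatch.map (fun h => PySem.Str.rstrip h.2)) (s + d) = true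
        · rw [if_pos hPa]
          have hn : ((s + d - s).natAbs : Int) = d := by omega
          refine ⟨hPa, by omega, by omega, ?_⟩
          intro q hq h1 h2
          rw [pvKb_false_iff]
          omega
        · rw [if_neg hPa]
          by_cases hPb : pvCheckB lines (toMatch.map (fun h => PySem.Str.rstrip h.2)) (s - d) = true
          · rw [if_pos hPb]
            have hn : ((s - d - s).natAbs : Int) = d := by omega
            refine ⟨hPb, by omega, by omega, ?_⟩
            intro q hq h1 h2
            rw [pvKb_false_iff]
            rintro (h | ⟨hle, hsq, _⟩)
            · omega
            · have hqe : q = s + d := by omega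
              rw [hqe] at hq
              exact absurd hq hPa
          · rw [if_neg hPb]
            simp only [pvScanSigns]
            have ihh := ih (d + 1) (by omega) (by omega)
            cases hres : pvScanDeltas lines toMatch s (PySem.List.pyRange (d + 1) (w + 1) 1) with
            | some p =>
                rw [hres] at ihh
                obtain ⟨hp, hp1, hp2, hmin⟩ := ihh
                refine ⟨hp, by omega, hp2, ?_⟩
                intro q hq h1 h2
                by_cases hq0 : ((q - s).natAbs : Int) = d
                · have : q = s + d ∨ q = s - d := by omega
                  rcases this with h | h <;> rw [h] at hq
                  · exact absurd hq hPa
                  · exact absurd hq hPb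
                · exact hmin q hq (by omega) h2
            | none =>
                rw [hres] at ihh
                intro q hq h1
                by_cases hq0 : ((q - s).natAbs : Int) = d
                · have : q = s + d ∨ q = s - d := by omega
                  rcases this with h | h <;> rw [h] at hq
                  · exact absurd hq hPa
                  · exact absurd hq hPb
                · exact ihh q hq (by omega)

-- ===== VERDICT (by name: the statement is the Claim_ definition above) =====
theorem find_hunk_pos_py_spec : Claim_equal_find_hunk_pos_py := by
  intro lines hunk s fuzzy _
  unfold Spec_find_hunk_pos_py find_hunk_pos_py find_hunk_pos_py_alt
  cases hE : (pvToMatch hunk).isEmpty with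
  | true => simp only [hE, if_true]
  | false =>
      simp only [hE, Bool.false_eq_true, if_false]
      set w : Int := if fuzzy then (50 : Int) else 0 with hw
      have hw0 : 0 ≤ w := by rw [hw]; split_ifs <;> omega
      set need := (pvToMatch hunk).map (fun h => PySem.Str.rstrip h.2) with hneed
      set cands := (PySem.List.pyRange (s - w) (s + w + 1) 1).filter (pvCheckB lines need)
        with hcands
      have hmem : ∀ q, q ∈ cands ↔
          (pvCheckB lines need q = true ∧ ((q - s).natAbs : Int) ≤ w) := by
        intro q
        rw [hcands, List.mem_filter, PySem.List.mem_pyRange_one]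
        constructor
        · rintro ⟨⟨h1, h2⟩, h3⟩; exact ⟨h3, by omega⟩
        · rintro ⟨h3, h1⟩; exact ⟨⟨by omega, by omega⟩, h3⟩
      have spec := pvScanDeltas_spec lines (pvToMatch hunk) s w hw0 ((w + 1).toNat) 0
        le_rfl (by omega)
      cases hres : pvScanDeltas lines (pvToMatch hunk) s (PySem.List.pyRange 0 (w + 1) 1) with
      | some p =>
          rw [hres] at spec
          obtain ⟨hp, _, hpw, hmin⟩ := spec
          have hpc : p ∈ cands := (hmem p).2 ⟨by rw [hneed]; exact hp, hpw⟩
          rw [pvMin2_eq_foldl]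
          cases hc : cands with
          | nil => rw [hc] at hpc; simp at hpc
          | cons c t =>
              obtain ⟨r, hr, hrm, hcr, hall⟩ := pvFoldMin_spec s t c
              have hfold : (c :: t).foldl (fun acc x => match acc with
                  | none => some x
                  | some m => if pvKb s x m then some x else some m) none = some r := by
                simpa using hr
              rw [hfold]
              have hrc : r ∈ cands := by
                rw [hc]
                rcases hrm with h | h
                · rw [h]; exact List.mem_cons_self
                · exact List.mem_cons_of_mem _ h
              have hrP := (hmem r).1 hrc
              have h1 : pvKb s r p = false := by
                refine hmin r ?_ (by exact_mod_cast Nat.zero_le _) hrP.2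
                have := hrP.1
                rw [hneed] at this
                exact this
              have h2 : pvKb s p r = false := by
                have hpct : p ∈ c :: t := hc ▸ hpc
                rcases List.mem_cons.mp hpct with h | h
                · rw [h]; exact hcr
                · exact hall p h
              have hpr : p = r := by
                by_contra hne
                rcases pvKb_total s p r hne with h | h
                · rw [h2] at h; exact absurd h (by simp)
                · rw [h1] at h; exact absurd h (by simp)
              rw [hpr]
      | none =>
          rw [hres] at spec
          have hcn : cands = [] := by
            rw [List.eq_nil_iff_forall_not_mem]
            intro q hq
            have hq' := (hmem q).1 hq
            refine spec q ?_ (by exact_mod_cast Nat.zero_le _) hq'.2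
            have := hq'.1
            rw [hneed] at this
            exact this
          rw [pvMin2_eq_foldl, hcn]
          rfl
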